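-- pv_equiv track=rewrite | github.com/kgryczan/excelbi_puzzles | Excel/700-799/792/792 Challenge.py | chain_sort
-- ===== SOURCE A (Python) =====
-- import string
--
-- def chain_sort(words):
--     seed, pool, out = "Apple", [w for w in words if w != "Apple"], ["Apple"]
--     abc = string.ascii_lowercase
--     while pool:
--         last = out[-1][-1].lower()
--         order = abc[abc.index(last):] + abc[:abc.index(last)]
--         firsts = [w[0].lower() for w in pool]
--         idx = next(firsts.index(c) for c in order if c in firsts)
--         out.append(pool.pop(idx))
--     return out
-- ===== SOURCE B (Python) =====
-- def chain_sort(words):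
--     out = ["Apple"]
--     buckets = [[] for _ in range(26)]
--     n = 0
--     for w in reversed(words):
--         if w != "Apple":
--             buckets[ord(w[0].lower()) - 97].append(w)
--             n += 1
--     cur = ord("e") - 97
--     for _ in range(n):
--         k = cur
--         while not buckets[k]:
--             k = (k + 1) % 26
--         w = buckets[k].pop()
--         out.append(w)
--         cur = ord(w[-1].lower()) - 97
--     return out
-- ===== Notes on version B (the rewrite author's own statement) =====
-- stated objective: faster
-- what changed: Instead of rescanning the whole pool each step (rebuilding the firsts list and doing linear index/pop), B buckets the words once into 26 per-letter stacks (filled in reverse so pop() yields the earliest word) and each step does a cyclic scan over at most 26 buckets and an O(1) pop.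
-- outside the precondition, e.g. on chain_sort(['e1']): A returns ['Apple', 'e1'], B returns ['Apple', 'e1']
import Mathlib
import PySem

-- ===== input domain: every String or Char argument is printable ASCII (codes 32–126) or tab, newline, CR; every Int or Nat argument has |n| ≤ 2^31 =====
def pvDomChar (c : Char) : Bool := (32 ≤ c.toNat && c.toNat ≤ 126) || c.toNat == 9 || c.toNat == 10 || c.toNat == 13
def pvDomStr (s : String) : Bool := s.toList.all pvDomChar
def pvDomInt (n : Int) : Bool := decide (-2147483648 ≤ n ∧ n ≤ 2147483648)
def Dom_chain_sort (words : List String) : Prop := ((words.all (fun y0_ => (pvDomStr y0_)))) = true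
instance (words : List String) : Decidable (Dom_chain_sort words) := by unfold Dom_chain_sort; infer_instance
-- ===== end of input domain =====

-- B replaces A's per-step rescan of the whole pool by 26 per-letter stacks filled once (reverse order,
-- so pop-from-the-end yields the earliest word) and a cyclic scan of at most 26 buckets per step: faster.

-- ===== PORT A =====
def pvAbc : List Char := "abcdefghijklmnopqrstuvwxyz".toList

-- w[0].lower() for the firsts comprehension (default ' ' is never reached under Pre_: words are nonempty)
def pvFirst (w : String) : Char := PySem.Chars.lowerChar ((PySem.Str.pyGet? w 0).getD ' ')

def pvChainALoop : Nat → List String → List String → List String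
  | 0, _, out => out
  | fuel+1, pool, out =>
    if pool.isEmpty then out else
    match PySem.List.pyGet? out (-1) with
    | none => out                                    -- unreachable: out starts nonempty
    | some lw =>
      match PySem.Str.pyGet? lw (-1) with
      | none => out                                  -- IndexError (excluded by Pre_)
      | some lc =>
        let last := PySem.Chars.lowerChar lc
        match PySem.List.index? pvAbc last with
        | none => out                                -- ValueError from abc.index (excluded by Pre_)
        | some li =>
          let order := PySem.List.slice pvAbc (some (li : Int)) none ++
                       PySem.List.slice pvAbc none (some (li : Int))
          let firsts := pool.map pvFirst
          match order.find? (fun c => firsts.contains c) with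
          | none => out                              -- StopIteration (excluded by Pre_)
          | some c =>
            match PySem.List.index? firsts c with
            | none => out                            -- unreachable: c was found in firsts
            | some idx =>
              match PySem.List.pop? pool (idx : Int) with
              | none => out                          -- unreachable: idx < len(pool)
              | some r => pvChainALoop fuel r.2 (out ++ [r.1])

def chain_sort (words : List String) : List String :=
  let pool := words.filter (fun w => w != "Apple")
  pvChainALoop pool.length pool ["Apple"]

-- ===== PORT B =====
-- ord(w[0].lower()) - 97 (Nat subtraction; under Pre_ the first character is a letter, so this is < 26)
def pvLetterIdx (w : String) : Nat :=
  (PySem.Chars.lowerChar ((PySem.Str.pyGet? w 0).getD ' ')).toNat - 97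

def pvLastIdx (w : String) : Nat :=
  (PySem.Chars.lowerChar ((PySem.Str.pyGet? w (-1)).getD ' ')).toNat - 97

def pvFill : List String → List (List String) × Nat → List (List String) × Nat
  | [], st => st
  | w :: ws, st =>
    if w = "Apple" then pvFill ws st
    else pvFill ws (st.1.set (pvLetterIdx w) (st.1.getD (pvLetterIdx w) [] ++ [w]), st.2 + 1)

def pvScan : Nat → Nat → List (List String) → Nat
  | 0, k, _ => k                                     -- fuel 26: the while loop hits a nonempty bucket within 26 steps
  | f+1, k, bs => if (bs.getD k []).isEmpty then pvScan f ((k + 1) % 26) bs else k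

def pvBLoop : Nat → Nat → List (List String) → List String → List String
  | 0, _, _, out => out
  | n+1, cur, bs, out =>
    let k := pvScan 26 cur bs
    let b := bs.getD k []
    match b.getLast? with
    | none => out                                    -- unreachable: the scanned bucket is nonempty
    | some w => pvBLoop n (pvLastIdx w) (bs.set k b.dropLast) (out ++ [w])

def chain_sort_alt (words : List String) : List String :=
  let st := pvFill words.reverse (List.replicate 26 [], 0)
  pvBLoop st.2 ('e'.toNat - 97) st.1 ["Apple"]

-- ===== PRECONDITION & SPEC =====
def pvIsLetter (c : Char) : Bool := ('a' ≤ c && c ≤ 'z') || ('A' ≤ c && c ≤ 'Z')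

-- Pre_ excludes words (other than "Apple") that are empty or whose first or last character is not an
-- ASCII letter: on such inputs A raises (IndexError / ValueError / StopIteration) — except when the single
-- offending word happens to be chained last, where both programs return the same value (see cites).
def Pre_chain_sort (words : List String) : Prop :=
  ∀ w ∈ words, w ≠ "Apple" →
    w.toList ≠ [] ∧ pvIsLetter (w.toList.headD ' ') = true ∧ pvIsLetter (w.toList.getLastD ' ') = true
instance (words : List String) : Decidable (Pre_chain_sort words) := by
  unfold Pre_chain_sort; infer_instance

def pvWitness_chain_sort : List String := ["ear", "Bob", "apple"]

def Spec_chain_sort (words : List String) (out : List String) : Prop := out = chain_sort_alt words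
instance (words : List String) (out : List String) : Decidable (Spec_chain_sort words out) := by
  unfold Spec_chain_sort; infer_instance

-- ===== CLAIM (what is proved, stated in full; the proofs are below) =====
def Claim_equal_chain_sort : Prop :=
  ∀ (words : List String), Dom_chain_sort words → Pre_chain_sort words →
    Spec_chain_sort words (chain_sort words)


-- ===== LEMMAS AND PROOFS =====

-- a word acceptable to both programs: nonempty, letter first and last characters
def pvOk (w : String) : Prop :=
  w.toList ≠ [] ∧ pvIsLetter (w.toList.headD ' ') = true ∧ pvIsLetter (w.toList.getLastD ' ') = true

lemma pvChar_toNat_inj {c d : Char} (h : c.toNat = d.toNat) : c = d :=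
  Char.ext (UInt32.toNat_inj.mp h)

lemma pvle (c d : Char) : c ≤ d ↔ c.toNat ≤ d.toNat := by
  rw [Char.le_def, UInt32.le_iff_toNat_le]; rfl

lemma pvLower_letter {c : Char} (h : pvIsLetter c = true) :
    97 ≤ (PySem.Chars.lowerChar c).toNat ∧ (PySem.Chars.lowerChar c).toNat ≤ 122 := by
  simp only [pvIsLetter, Bool.or_eq_true, Bool.and_eq_true, decide_eq_true_eq, pvle] at h
  have h' : (97 ≤ c.toNat ∧ c.toNat ≤ 122) ∨ (65 ≤ c.toNat ∧ c.toNat ≤ 90) := by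
    simpa using h
  simp only [PySem.Chars.lowerChar, PySem.Chars.isupper]
  by_cases hu : ('A' ≤ c ∧ c ≤ 'Z')
  · have h65 : 65 ≤ c.toNat := by have := (pvle 'A' c).mp hu.1; simpa using this
    have h90 : c.toNat ≤ 90 := by have := (pvle c 'Z').mp hu.2; simpa using this
    simp only [hu.1, hu.2, decide_true, Bool.and_self, if_pos]
    rw [Char.toNat_ofNat, if_pos (Or.inl (by omega : c.toNat + 32 < 55296))]
    omega
  · have hng : ¬ (decide ('A' ≤ c) && decide (c ≤ 'Z')) = true := by
      simpa [Bool.and_eq_true, decide_eq_true_eq] using hu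
    rw [if_neg (by simpa using hng)]
    rcases h' with h' | h'
    · omega
    · exact absurd ⟨(pvle 'A' c).mpr (by simpa using h'.1),
        (pvle c 'Z').mpr (by simpa using h'.2)⟩ hu

lemma pvAbc_getD_toNat : ∀ k, k < 26 → (pvAbc.getD k ' ').toNat = 97 + k := by decide

lemma pvAbc_getD_eq {c : Char} (h97 : 97 ≤ c.toNat) (h122 : c.toNat ≤ 122) :
    pvAbc.getD (c.toNat - 97) ' ' = c := by
  apply pvChar_toNat_inj
  rw [pvAbc_getD_toNat _ (by omega)]; omega

set_option maxRecDepth 40000 in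
lemma pvAbc_index? {c : Char} (h97 : 97 ≤ c.toNat) (h122 : c.toNat ≤ 122) :
    PySem.List.index? pvAbc c = some (c.toNat - 97) := by
  have h : ∀ k, k < 26 → PySem.List.index? pvAbc (pvAbc.getD k ' ') = some k := by decide
  have h2 := h (c.toNat - 97) (by omega)
  rwa [pvAbc_getD_eq h97 h122] at h2

lemma pvFirst_eq {w : String} (hw : w.toList ≠ []) :
    pvFirst w = PySem.Chars.lowerChar (w.toList.headD ' ') := by
  cases h : w.toList with
  | nil => exact absurd h hw
  | cons c t =>
    simp [pvFirst, PySem.Str.pyGet?_eq, h, PySem.List.pyGet?_zero_cons]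

lemma pvStrLast_eq {w : String} (hw : w.toList ≠ []) :
    PySem.Str.pyGet? w (-1) = some (w.toList.getLastD ' ') := by
  rw [PySem.Str.pyGet?_eq]
  simp only [PySem.Chars.pyGet?_eq_listPyGet?, PySem.List.pyGet?_neg_one]
  rw [List.getLastD_eq_getLast?, List.getLast?_eq_some_getLast hw]
  rfl

lemma pvLetterIdx_def (w : String) : pvLetterIdx w = (pvFirst w).toNat - 97 := rfl

lemma pvFirst_letter {w : String} (h : pvOk w) :
    97 ≤ (pvFirst w).toNat ∧ (pvFirst w).toNat ≤ 122 := by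
  rw [pvFirst_eq h.1]; exact pvLower_letter h.2.1

lemma pvLetterIdx_lt {w : String} (h : pvOk w) : pvLetterIdx w < 26 := by
  have := pvFirst_letter h
  rw [pvLetterIdx_def]; omega

lemma pvLastIdx_eq {w : String} (hw : w.toList ≠ []) :
    pvLastIdx w = (PySem.Chars.lowerChar (w.toList.getLastD ' ')).toNat - 97 := by
  simp [pvLastIdx, PySem.List.pyGet?_neg_one, List.getLastD_eq_getLast?, PySem.Str.pyGet?_eq]

lemma pvLastIdx_lt {w : String} (h : pvOk w) : pvLastIdx w < 26 := by
  rw [pvLastIdx_eq h.1]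
  have := pvLower_letter h.2.2
  omega

lemma pvFirst_eq_iff {w : String} {k : Nat} (h : pvOk w) (hk : k < 26) :
    pvFirst w = pvAbc.getD k ' ' ↔ pvLetterIdx w = k := by
  have hb := pvFirst_letter h
  constructor
  · intro he
    have : (pvFirst w).toNat = 97 + k := by rw [he, pvAbc_getD_toNat _ hk]
    rw [pvLetterIdx_def]; omega
  · intro he
    have h1 : (pvFirst w).toNat - 97 = k := by rw [pvLetterIdx_def] at he; omega
    rw [← h1, pvAbc_getD_eq hb.1 hb.2]

-- the rotated alphabet, elementwise
lemma pvRot : ∀ li, li < 26 →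
    (List.drop li pvAbc ++ List.take li pvAbc) =
      (List.range 26).map (fun j => pvAbc.getD ((li + j) % 26) ' ') := by decide

lemma pvRevDropLast {α : Type} (l : List α) : l.reverse.dropLast = l.tail.reverse := by
  cases l with
  | nil => simp
  | cons x t => simp

-- first element of l satisfying p, located at the first index i with p l[i]:
-- head of the filter, and erasing it turns the filter into its tail
lemma pvFilterFirst {α : Type} (p : α → Bool) :
    ∀ (l : List α) (i : Nat) (hi : i < l.length),
      p (l[i]'hi) = true → (∀ j (hj : j < i), p (l[j]'(Nat.lt_trans hj hi)) = false) →
      (l.filter p).head? = some (l[i]'hi) ∧ (l.eraseIdx i).filter p = (l.filter p).tail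
  | [], i, hi, _, _ => absurd hi (by simp)
  | x :: t, 0, _, hp, _ => by simp at hp; simp [List.filter_cons, hp]
  | x :: t, i+1, hi, hp, hlt => by
    have hx : p x = false := hlt 0 (Nat.succ_pos _)
    have ih := pvFilterFirst p t i (by simpa using hi) (by simpa using hp)
      (fun j hj => by simpa using hlt (j+1) (by omega))
    simpa [List.filter_cons, hx, List.eraseIdx_cons_succ] using ih

-- erasing an element that fails q leaves the filter unchanged
lemma pvFilterEraseNe {α : Type} (q : α → Bool) :
    ∀ (l : List α) (i : Nat) (hi : i < l.length), q (l[i]'hi) = false →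
      (l.eraseIdx i).filter q = l.filter q
  | [], i, hi, _ => absurd hi (by simp)
  | x :: t, 0, _, hq => by simp at hq; simp [List.filter_cons, hq]
  | x :: t, i+1, hi, hq => by
    have ih := pvFilterEraseNe q t i (by simpa using hi) (by simpa using hq)
    simp [List.eraseIdx_cons_succ, List.filter_cons, ih]

-- the cyclic bucket scan lands on the first nonempty bucket, as located by find? on range
lemma pvScan_found (bs : List (List String)) :
    ∀ (fuel k j0 : Nat), k < 26 →
      (List.range fuel).find? (fun j => !(bs.getD ((k + j) % 26) []).isEmpty) = some j0 →
      pvScan fuel k bs = (k + j0) % 26 := by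
  intro fuel
  induction fuel with
  | zero => intro k j0 _ hf; simp at hf
  | succ f ih =>
    intro k j0 hk hf
    rw [List.range_succ_eq_map, List.find?_cons] at hf
    have hk0 : (k + 0) % 26 = k := by omega
    by_cases h0 : (bs.getD k []).isEmpty
    · rw [hk0] at hf
      simp only [h0, Bool.not_true] at hf
      rw [List.find?_map] at hf
      rcases Option.map_eq_some_iff.mp hf with ⟨j1, hj1, rfl⟩
      have hpred : (fun j => (!(bs.getD ((k + Nat.succ j) % 26) []).isEmpty))
          = (fun j => (!(bs.getD (((k + 1) % 26 + j) % 26) []).isEmpty)) := by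
        funext j
        have : (k + Nat.succ j) % 26 = ((k + 1) % 26 + j) % 26 := by omega
        rw [this]
      rw [show ((fun j => !(bs.getD ((k + j) % 26) []).isEmpty) ∘ Nat.succ)
            = fun j => (!(bs.getD ((k + Nat.succ j) % 26) []).isEmpty) from rfl, hpred] at hj1
      have := ih ((k + 1) % 26) j1 (Nat.mod_lt _ (by omega)) hj1
      rw [pvScan, if_pos h0, this]
      omega
    · rw [hk0] at hf
      simp only [h0, Bool.not_false] at hf
      cases hf
      rw [pvScan, if_neg h0, hk0]


lemma pvFill_spec :
    ∀ (ws : List String) (bs : List (List String)) (n : Nat),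
      (∀ w ∈ ws, w ≠ "Apple" → pvLetterIdx w < 26) → bs.length = 26 →
      (pvFill ws (bs, n)).1.length = 26 ∧
      (pvFill ws (bs, n)).2 = n + (ws.filter (fun w => w != "Apple")).length ∧
      (∀ k, k < 26 → (pvFill ws (bs, n)).1.getD k [] =
        bs.getD k [] ++ ws.filter (fun w => (w != "Apple") && (pvLetterIdx w == k)))
  | [], bs, n, _, hbs => by simp [pvFill, hbs]
  | w :: ws, bs, n, hws, hbs => by
    by_cases hA : w = "Apple"
    · have ih := pvFill_spec ws bs n (fun v hv h => hws v (List.mem_cons_of_mem _ hv) h) hbs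
      subst hA
      simp only [pvFill, if_pos rfl, List.filter_cons]
      simpa using ih
    · have hj : pvLetterIdx w < 26 := hws w List.mem_cons_self hA
      have hbs' : (bs.set (pvLetterIdx w) (bs.getD (pvLetterIdx w) [] ++ [w])).length = 26 := by
        rw [List.length_set, hbs]
      have ih := pvFill_spec ws (bs.set (pvLetterIdx w) (bs.getD (pvLetterIdx w) [] ++ [w]))
        (n + 1) (fun v hv h => hws v (List.mem_cons_of_mem _ hv) h) hbs'
      have hbne : (w != "Apple") = true := by simpa using hA
      refine ⟨?_, ?_, ?_⟩
      · simpa [pvFill, if_neg hA] using ih.1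
      · rw [show pvFill (w :: ws) (bs, n)
            = pvFill ws (bs.set (pvLetterIdx w) (bs.getD (pvLetterIdx w) [] ++ [w]), n + 1)
            from by simp [pvFill, hA], ih.2.1, List.filter_cons, hbne]
        simp; omega
      · intro k hk
        rw [show pvFill (w :: ws) (bs, n)
            = pvFill ws (bs.set (pvLetterIdx w) (bs.getD (pvLetterIdx w) [] ++ [w]), n + 1)
            from by simp [pvFill, hA], ih.2.2 k hk, List.filter_cons]
        by_cases hkk : pvLetterIdx w = k
        · have hset : (bs.set (pvLetterIdx w) (bs.getD (pvLetterIdx w) [] ++ [w])).getD k []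
              = bs.getD (pvLetterIdx w) [] ++ [w] := by
            rw [List.getD_eq_getElem?_getD, hkk, List.getElem?_set_self (by omega), Option.getD_some]
          rw [hset, hkk]
          simp [hbne, hkk]
        · have hset : (bs.set (pvLetterIdx w) (bs.getD (pvLetterIdx w) [] ++ [w])).getD k []
              = bs.getD k [] := by
            rw [List.getD_eq_getElem?_getD, List.getElem?_set_ne hkk, ← List.getD_eq_getElem?_getD]
          rw [hset]
          simp [hkk]

lemma pvLoop_eq :
    ∀ (n : Nat) (pool bs out : List _) (cur : Nat) (hout : out ≠ []),
      n = pool.length →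
      (∀ w ∈ pool, pvOk w) →
      pvOk (out.getLast hout) →
      cur = pvLastIdx (out.getLast hout) →
      bs.length = 26 →
      (∀ k, k < 26 → bs.getD k [] = (pool.filter (fun w => pvLetterIdx w == k)).reverse) →
      pvChainALoop n pool out = pvBLoop n cur bs out := by
  intro n
  induction n with
  | zero => intros; rfl
  | succ m ih =>
    intro pool bs out cur hout hn hpool hokl hcur hbs hbuck
    have hpne : pool ≠ [] := by intro h; rw [h] at hn; simp at hn
    have hpoolE : pool.isEmpty = false := by simpa [List.isEmpty_iff] using hpne
    have hlw : out.getLast? = some (out.getLast hout) := List.getLast?_eq_some_getLast hout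
    set lw := out.getLast hout with hlwdef
    have hcur26 : cur < 26 := hcur ▸ pvLastIdx_lt hokl
    have hA1 : PySem.List.pyGet? out (-1) = some lw := by
      rw [PySem.List.pyGet?_neg_one, hlw]
    have hlc : PySem.Str.pyGet? lw (-1) = some (lw.toList.getLastD ' ') := pvStrLast_eq hokl.1
    set lc := lw.toList.getLastD ' ' with hlcdef
    have hlow := pvLower_letter (hokl.2.2 : pvIsLetter lc = true)
    set lst := PySem.Chars.lowerChar lc with hlst
    have hidx : PySem.List.index? pvAbc lst = some (lst.toNat - 97) :=
      pvAbc_index? hlow.1 hlow.2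
    have hcur' : cur = lst.toNat - 97 := by
      rw [hcur, pvLastIdx_eq hokl.1]
    -- the bucket/firsts bridge, per scanned position
    have hbridge : ∀ j : Nat, ((pool.map pvFirst).contains (pvAbc.getD ((cur + j) % 26) ' '))
        = !(bs.getD ((cur + j) % 26) []).isEmpty := by
      intro j
      have hk26 : (cur + j) % 26 < 26 := Nat.mod_lt _ (by omega)
      rw [hbuck _ hk26, Bool.eq_iff_iff, List.contains_iff_mem, Bool.not_eq_true',
        List.isEmpty_eq_false_iff, List.mem_map, ne_eq, List.reverse_eq_nil_iff]
      constructor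
      · rintro ⟨w, hw, he⟩ hnil
        have hwk : pvLetterIdx w = (cur + j) % 26 := (pvFirst_eq_iff (hpool w hw) hk26).mp he
        rw [List.filter_eq_nil_iff] at hnil
        exact hnil w hw (by simp [hwk])
      · intro hne
        rcases List.exists_mem_of_ne_nil _ hne with ⟨w, hw⟩
        rcases List.mem_filter.mp hw with ⟨hwp, hwk⟩
        exact ⟨w, hwp, (pvFirst_eq_iff (hpool w hwp) hk26).mpr (by simpa using hwk)⟩
    -- a nonempty bucket exists: find? on range 26 succeeds
    have hex : (List.range 26).find? (fun j => !(bs.getD ((cur + j) % 26) []).isEmpty) ≠ none := by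
      intro hnone
      rw [List.find?_eq_none] at hnone
      rcases List.exists_mem_of_ne_nil _ hpne with ⟨w0, hw0⟩
      have hk0 : pvLetterIdx w0 < 26 := pvLetterIdx_lt (hpool _ hw0)
      have hjlt : (26 + pvLetterIdx w0 - cur) % 26 < 26 := Nat.mod_lt _ (by omega)
      have hjmod : (cur + (26 + pvLetterIdx w0 - cur) % 26) % 26 = pvLetterIdx w0 := by omega
      have hcontra := hnone _ (List.mem_range.mpr hjlt)
      rw [hjmod, hbuck _ hk0] at hcontra
      simp only [Bool.not_eq_true', Bool.not_eq_false, List.isEmpty_iff,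
        List.reverse_eq_nil_iff, Decidable.not_not] at hcontra
      rw [List.filter_eq_nil_iff] at hcontra
      exact hcontra w0 hw0 (by simp)
    rcases Option.ne_none_iff_exists'.mp hex with ⟨j0, hj0⟩
    have hks : (cur + j0) % 26 < 26 := Nat.mod_lt _ (by omega)
    set kstar := (cur + j0) % 26 with hksdef
    have hscan : pvScan 26 cur bs = kstar := pvScan_found bs 26 cur j0 hcur26 hj0
    -- A's generator: first usable letter of the rotated alphabet
    have hfindA : (((List.range 26).map (fun j => pvAbc.getD ((cur + j) % 26) ' ')).find?
        (fun c => (pool.map pvFirst).contains c)) = some (pvAbc.getD kstar ' ') := by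
      rw [List.find?_map]
      have hpe : ((fun c => (pool.map pvFirst).contains c)
            ∘ (fun j => pvAbc.getD ((cur + j) % 26) ' '))
          = (fun j => !(bs.getD ((cur + j) % 26) []).isEmpty) := by
        funext j; exact hbridge j
      rw [hpe, hj0, Option.map_some]
    have hj0p : (!(bs.getD kstar []).isEmpty) = true := by
      have hp := List.find?_some hj0
      simpa using hp
    have hcm : pvAbc.getD kstar ' ' ∈ pool.map pvFirst :=
      List.contains_iff_mem.mp (by rw [hbridge j0]; exact hj0p)
    have hisome : (PySem.List.index? (pool.map pvFirst) (pvAbc.getD kstar ' ')).isSome := by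
      rw [PySem.List.index?_isSome_iff]
      exact hcm
    rcases Option.isSome_iff_exists.mp hisome with ⟨i, hi⟩
    rcases PySem.List.getElem_of_index?_eq_some hi with ⟨hilt, hieq, himin⟩
    have hiplt : i < pool.length := by simpa using hilt
    have hpi : pvLetterIdx (pool[i]'hiplt) = kstar :=
      (pvFirst_eq_iff (hpool _ (List.getElem_mem _)) hks).mp (by
        rw [← hieq]; simp [List.getElem_map])
    have hmin' : ∀ j (hj : j < i),
        ((fun w => pvLetterIdx w == kstar) (pool[j]'(Nat.lt_trans hj hiplt))) = false := by
      intro j hj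
      have hne := himin j hj
      rw [List.getElem_map] at hne
      simp only [beq_eq_false_iff_ne, ne_eq]
      intro hjk
      exact hne ((pvFirst_eq_iff (hpool _ (List.getElem_mem _)) hks).mpr hjk)
    rcases pvFilterFirst (fun w => pvLetterIdx w == kstar) pool i hiplt (by simp [hpi]) hmin'
      with ⟨hhead, herase⟩
    have hpop : PySem.List.pop? pool ((i : Nat) : Int) = some (pool[i]'hiplt, pool.eraseIdx i) :=
      PySem.List.pop?_natCast pool i hiplt
    have hgl : (bs.getD kstar []).getLast? = some (pool[i]'hiplt) := by
      rw [hbuck kstar hks, List.getLast?_reverse, hhead]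
    -- one step of A
    have hstepA : pvChainALoop (m + 1) pool out
        = pvChainALoop m (pool.eraseIdx i) (out ++ [pool[i]'hiplt]) := by
      rw [pvChainALoop, if_neg (by simp [hpoolE]), hA1]
      simp only
      rw [hlc]
      simp only
      rw [← hlst, hidx]
      simp only
      rw [PySem.List.slice_from_natCast, PySem.List.slice_to_natCast, ← hcur',
        pvRot cur hcur26, hfindA]
      simp only
      rw [hi]
      simp only
      rw [hpop]
    -- one step of B
    have hstepB : pvBLoop (m + 1) cur bs out
        = pvBLoop m (pvLastIdx (pool[i]'hiplt))
            (bs.set kstar ((bs.getD kstar []).dropLast)) (out ++ [pool[i]'hiplt]) := by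
      rw [pvBLoop]
      simp only [hscan, hgl]
    rw [hstepA, hstepB]
    -- re-establish the invariant and recurse
    have hw : pool[i]'hiplt ∈ pool := List.getElem_mem _
    have hout' : out ++ [pool[i]'hiplt] ≠ [] := by simp
    have hlast' : (out ++ [pool[i]'hiplt]).getLast hout' = pool[i]'hiplt := List.getLast_concat
    refine ih (pool.eraseIdx i) (bs.set kstar ((bs.getD kstar []).dropLast))
      (out ++ [pool[i]'hiplt]) (pvLastIdx (pool[i]'hiplt)) hout' ?_ ?_ ?_ ?_ ?_ ?_
    · rw [List.length_eraseIdx, if_pos hiplt]; omega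
    · exact fun v hv => hpool v (List.mem_of_mem_eraseIdx hv)
    · rw [hlast']; exact hpool _ hw
    · rw [hlast']
    · rw [List.length_set, hbs]
    · intro k hk
      by_cases hkk : k = kstar
      · rw [hkk]
        have hset : (bs.set kstar ((bs.getD kstar []).dropLast)).getD kstar []
            = (bs.getD kstar []).dropLast := by
          rw [List.getD_eq_getElem?_getD, List.getElem?_set_self (by omega), Option.getD_some]
        rw [hset, hbuck kstar hks, pvRevDropLast, herase]
      · have hset : (bs.set kstar ((bs.getD kstar []).dropLast)).getD k []
            = bs.getD k [] := by
          rw [List.getD_eq_getElem?_getD, List.getElem?_set_ne (fun h => hkk h.symm),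
            ← List.getD_eq_getElem?_getD]
        rw [hset, hbuck k hk,
          pvFilterEraseNe (fun w => pvLetterIdx w == k) pool i hiplt (by simp [hpi]; omega)]

-- ===== VERDICT (by name: the statement is the Claim_ definition above) =====
theorem chain_sort_spec : Claim_equal_chain_sort := by
  unfold Claim_equal_chain_sort Spec_chain_sort
  intro words _ hpre
  have hok : ∀ w ∈ words, w ≠ "Apple" → pvOk w := fun w hw hne => hpre w hw hne
  have hokp : ∀ w ∈ words.filter (fun w => w != "Apple"), pvOk w := by
    intro w hw
    rcases List.mem_filter.mp hw with ⟨hmem, hne⟩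
    exact hok w hmem (by simpa using hne)
  have hws : ∀ w ∈ words.reverse, w ≠ "Apple" → pvLetterIdx w < 26 := by
    intro w hw hne
    exact pvLetterIdx_lt (hok w (List.mem_reverse.mp hw) hne)
  obtain ⟨hlen, hsnd, hget⟩ := pvFill_spec words.reverse (List.replicate 26 []) 0 hws (by simp)
  have hgA : chain_sort words = pvChainALoop (words.filter (fun w => w != "Apple")).length
      (words.filter (fun w => w != "Apple")) ["Apple"] := rfl
  have hgB : chain_sort_alt words = pvBLoop (pvFill words.reverse (List.replicate 26 [], 0)).2
      ('e'.toNat - 97) (pvFill words.reverse (List.replicate 26 [], 0)).1 ["Apple"] := rfl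
  rw [hgA, hgB, hsnd, Nat.zero_add]
  have hcnt : (words.reverse.filter (fun w => w != "Apple")).length
      = (words.filter (fun w => w != "Apple")).length := by
    rw [List.filter_reverse, List.length_reverse]
  rw [hcnt]
  have hcur0 : ('e'.toNat - 97) = pvLastIdx "Apple" := by decide
  rw [hcur0]
  refine (pvLoop_eq _ _ _ _ _ (by simp) rfl hokp ?_ ?_ hlen ?_).symm.symm
  · show pvOk "Apple"
    exact ⟨by decide, by decide, by decide⟩
  · rfl
  · intro k hk
    rw [hget k hk, List.getD_replicate _ hk, List.nil_append, List.filter_reverse]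
    have hff : List.filter (fun w => w != "Apple" && pvLetterIdx w == k) words
        = List.filter (fun w => pvLetterIdx w == k)
            (List.filter (fun w => w != "Apple") words) := by
      rw [List.filter_filter]
      exact List.filter_congr (fun a _ => Bool.and_comm _ _)
    rw [hff]
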